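-- pv_equiv track=rewrite | github.com/k-wal/farmers-movement-archive | code/scrapers/trolley_scraper2.py | get_formed_articles
-- ===== SOURCE A (Python) =====
-- def get_formed_articles(all_text, date):
-- 	articles = []
-- 	cur_article = {'date' : date}
-- 	for elem in all_text:
-- 		if elem['type'] == 'title' and 'title' in cur_article.keys():
-- 			articles.append(cur_article)
-- 			cur_article = {'date' : date}
--
-- 		if elem['type'] == 'title':
-- 			cur_article['title'] = elem['text']
--
-- 		if elem['type'] == 'author':
-- 			cur_article['author'] = elem['text']
--
-- 		if elem['type'] == 'location':
-- 			cur_article['location'] = elem['text']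
--
-- 		if elem['type'] == 'content':
-- 			if 'content' not in cur_article.keys():
-- 				cur_article['content'] = ''
-- 			cur_article['content'] += elem['text'] + '\n'
-- 	articles.append(cur_article)
-- 	return articles
-- ===== SOURCE B (Python) =====
-- def get_formed_articles(all_text, date):
-- 	# Two passes: split all_text into article segments (a new segment starts at a
-- 	# 'title' element when the current segment already holds one), then build each
-- 	# article dict from its segment.
-- 	segments = []
-- 	cur = []
-- 	cur_has_title = False
-- 	for elem in all_text:
-- 		if elem['type'] == 'title':
-- 			if cur_has_title:
-- 				segments.append(cur)
-- 				cur = []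
-- 			cur_has_title = True
-- 		cur.append(elem)
-- 	segments.append(cur)
--
-- 	def build(segment):
-- 		article = {'date': date}
-- 		for elem in segment:
-- 			t = elem['type']
-- 			if t in ('title', 'author', 'location'):
-- 				article[t] = elem['text']
-- 			elif t == 'content':
-- 				article['content'] = article.get('content', '') + elem['text'] + '\n'
-- 		return article
--
-- 	return [build(segment) for segment in segments]
-- ===== Notes on version B (the rewrite author's own statement) =====
-- stated objective: alternative
-- what changed: A's single loop that interleaves dispatching fields into the current dict with flushing it on a repeated title is replaced by two explicit passes: first split all_text into article segments (a new segment starts at a 'title' element when the current segment already holds one), then map each segment to its article dict.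
import Mathlib
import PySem

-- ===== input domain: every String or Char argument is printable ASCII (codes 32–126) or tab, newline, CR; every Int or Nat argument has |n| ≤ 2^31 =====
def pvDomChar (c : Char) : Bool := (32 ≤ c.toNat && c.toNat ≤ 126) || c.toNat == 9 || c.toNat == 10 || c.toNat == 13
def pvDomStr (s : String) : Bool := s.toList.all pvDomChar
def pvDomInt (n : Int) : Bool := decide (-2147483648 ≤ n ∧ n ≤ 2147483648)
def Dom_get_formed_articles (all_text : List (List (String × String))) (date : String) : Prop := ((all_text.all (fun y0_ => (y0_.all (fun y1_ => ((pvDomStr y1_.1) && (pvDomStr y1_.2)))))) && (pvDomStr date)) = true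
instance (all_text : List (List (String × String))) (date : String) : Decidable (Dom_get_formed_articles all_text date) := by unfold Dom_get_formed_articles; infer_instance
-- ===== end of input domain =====

-- B replaces A's single interleaved flush-and-dispatch loop by two passes (split into
-- segments, then build each article dict); same cost, different decomposition.
-- Equivalence is about the return value; neither program mutates its arguments.

-- ===== PORT A =====

-- elem['type'] / elem['text'] (total forms; Pre_ guarantees the key is present where A reads it)
def pvType (elem : List (String × String)) : String := (PySem.Dict.mk elem).getD "type" ""
def pvText (elem : List (String × String)) : String := (PySem.Dict.mk elem).getD "text" ""

-- the body of A's for-loop: possibly flush, then the four independent ifs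
def pvStepA (date : String)
    (st : List (List (String × String)) × PySem.Dict String String)
    (elem : List (String × String)) :
    List (List (String × String)) × PySem.Dict String String :=
  let articles := st.1
  let cur := st.2
  let p : List (List (String × String)) × PySem.Dict String String :=
    if pvType elem = "title" ∧ cur.contains "title" = true then
      (articles ++ [cur.items], PySem.Dict.mk [("date", date)])
    else (articles, cur)
  let articles := p.1
  let cur := p.2
  let cur := if pvType elem = "title" then cur.insert "title" (pvText elem) else cur
  let cur := if pvType elem = "author" then cur.insert "author" (pvText elem) else cur
  let cur := if pvType elem = "location" then cur.insert "location" (pvText elem) else cur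
  let cur :=
    if pvType elem = "content" then
      let cur := if cur.contains "content" = true then cur else cur.insert "content" ""
      cur.insert "content" (cur.getD "content" "" ++ (pvText elem ++ "\n"))
    else cur
  (articles, cur)

def get_formed_articles (all_text : List (List (String × String))) (date : String) :
    List (List (String × String)) :=
  let st := all_text.foldl (pvStepA date) ([], PySem.Dict.mk [("date", date)])
  st.1 ++ [st.2.items]

-- ===== PORT B =====

-- segmentation pass: start a new segment at a 'title' when the current one already has a title
def pvSegStep (st : List (List (List (String × String))) × List (List (String × String)) × Bool)
    (elem : List (String × String)) :
    List (List (List (String × String))) × List (List (String × String)) × Bool :=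
  let segs := st.1
  let cur := st.2.1
  let ht := st.2.2
  if pvType elem = "title" then
    if ht then (segs ++ [cur], [elem], true) else (segs, cur ++ [elem], true)
  else (segs, cur ++ [elem], ht)

-- build pass: one article dict from one segment
def pvBuildStep (d : PySem.Dict String String) (elem : List (String × String)) :
    PySem.Dict String String :=
  let t := pvType elem
  if t = "title" ∨ t = "author" ∨ t = "location" then d.insert t (pvText elem)
  else if t = "content" then d.insert "content" (d.getD "content" "" ++ (pvText elem ++ "\n"))
  else d

def pvBuildD (date : String) (seg : List (List (String × String))) : PySem.Dict String String :=
  seg.foldl pvBuildStep (PySem.Dict.mk [("date", date)])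

def pvBuild (date : String) (seg : List (List (String × String))) : List (String × String) :=
  (pvBuildD date seg).items

def get_formed_articles_alt (all_text : List (List (String × String))) (date : String) :
    List (List (String × String)) :=
  let st := all_text.foldl pvSegStep ([], [], false)
  (st.1 ++ [st.2.1]).map (pvBuild date)

-- ===== PRECONDITION & SPEC =====
-- Pre_ excludes exactly the inputs on which A raises KeyError: an element without a
-- 'type' key, or an element of one of the four handled types without a 'text' key.
def Pre_get_formed_articles (all_text : List (List (String × String))) (date : String) : Prop :=
  ∀ elem ∈ all_text, (PySem.Dict.mk elem).contains "type" = true ∧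
    ((PySem.Dict.mk elem).getD "type" "" ∈ (["title", "author", "location", "content"] : List String) →
      (PySem.Dict.mk elem).contains "text" = true)
instance (all_text : List (List (String × String))) (date : String) : Decidable (Pre_get_formed_articles all_text date) := by unfold Pre_get_formed_articles; infer_instance

def pvWitness_get_formed_articles : (List (List (String × String))) × String :=
  ([[("type", "title"), ("text", "Strike")], [("type", "content"), ("text", "Body")]], "2021-01-01")

def Spec_get_formed_articles (all_text : List (List (String × String))) (date : String) (out : List (List (String × String))) : Prop := out = get_formed_articles_alt all_text date
instance (all_text : List (List (String × String))) (date : String) (out : List (List (String × String))) : Decidable (Spec_get_formed_articles all_text date out) := by unfold Spec_get_formed_articles; infer_instance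

-- ===== CLAIM (what is proved, stated in full; the proofs are below) =====
def Claim_equal_get_formed_articles : Prop := ∀ (all_text : List (List (String × String))) (date : String), Dom_get_formed_articles all_text date → Pre_get_formed_articles all_text date → Spec_get_formed_articles all_text date (get_formed_articles all_text date)

-- ===== LEMMAS AND PROOFS =====

-- the invariant: A's folded state matches B's (segments, current segment, has-title flag)
theorem pv_inv (date : String) (l : List (List (String × String))) :
    ∀ (segs : List (List (List (String × String)))) (cur : List (List (String × String)))
      (ht : Bool) (arts : List (List (String × String))) (d : PySem.Dict String String),
      arts = segs.map (pvBuild date) → d = pvBuildD date cur →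
      ht = d.contains "title" →
      (l.foldl (pvStepA date) (arts, d)).1 ++ [(l.foldl (pvStepA date) (arts, d)).2.items]
        = ((l.foldl pvSegStep (segs, cur, ht)).1 ++ [(l.foldl pvSegStep (segs, cur, ht)).2.1]).map
            (pvBuild date) := by
  induction l with
  | nil =>
      intro segs cur ht arts d h1 h2 _
      simp [h1, h2, pvBuild]
  | cons e tl ih =>
      intro segs cur ht arts d h1 h2 h3
      simp only [List.foldl_cons]
      by_cases hty : pvType e = "title"
      · by_cases hht : ht = true
        · -- flush
          have hc : d.contains "title" = true := by rw [← h3]; exact hht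
          have hA : pvStepA date (arts, d) e
              = (arts ++ [d.items],
                 (PySem.Dict.mk [("date", date)]).insert "title" (pvText e)) := by
            simp [pvStepA, hty, hc]
          have hB : pvSegStep (segs, cur, ht) e = (segs ++ [cur], [e], true) := by
            simp [pvSegStep, hty, hht]
          rw [hA, hB]
          apply ih
          · simp [h1, h2, pvBuild]
          · simp [pvBuildD, pvBuildStep, hty]
          · rw [PySem.Dict.contains_insert_self]
        · -- first title of the segment
          have hc : d.contains "title" = false := by
            rw [← h3]; exact Bool.not_eq_true ht ▸ (by simpa using hht)
          have hA : pvStepA date (arts, d) e = (arts, d.insert "title" (pvText e)) := by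
            simp [pvStepA, hty, hc]
          have hB : pvSegStep (segs, cur, ht) e = (segs, cur ++ [e], true) := by
            simp [pvSegStep, hty, hht]
          rw [hA, hB]
          apply ih
          · exact h1
          · rw [show pvBuildD date (cur ++ [e]) = pvBuildStep (pvBuildD date cur) e from by
                  simp [pvBuildD, List.foldl_append], ← h2]
            simp [pvBuildStep, hty]
          · rw [PySem.Dict.contains_insert_self]
      · -- not a title: no flush, B appends to the current segment
        have hB : pvSegStep (segs, cur, ht) e = (segs, cur ++ [e], ht) := by
          simp [pvSegStep, hty]
        have hbuild : pvBuildD date (cur ++ [e]) = pvBuildStep (pvBuildD date cur) e := by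
          simp [pvBuildD, List.foldl_append]
        by_cases hau : pvType e = "author"
        · have hA : pvStepA date (arts, d) e = (arts, d.insert "author" (pvText e)) := by
            simp [pvStepA, hau]
          rw [hA, hB]
          apply ih
          · exact h1
          · rw [hbuild, ← h2]; simp [pvBuildStep, hau]
          · rw [h3, PySem.Dict.contains_insert]; simp
        · by_cases hlo : pvType e = "location"
          · have hA : pvStepA date (arts, d) e = (arts, d.insert "location" (pvText e)) := by
              simp [pvStepA, hlo]
            rw [hA, hB]
            apply ih
            · exact h1
            · rw [hbuild, ← h2]; simp [pvBuildStep, hlo]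
            · rw [h3, PySem.Dict.contains_insert]; simp
          · by_cases hco : pvType e = "content"
            · have hA : pvStepA date (arts, d) e
                  = (arts, d.insert "content" (d.getD "content" "" ++ (pvText e ++ "\n"))) := by
                by_cases hcc : d.contains "content" = true
                · simp [pvStepA, hco, hcc]
                · have hcc' : d.contains "content" = false := by simpa using hcc
                  simp [pvStepA, hco, hcc',
                        PySem.Dict.insert_insert_self,
                        PySem.Dict.getD_insert_self,
                        PySem.Dict.getD_of_not_contains _ _ hcc',
                        String.empty_append]
              rw [hA, hB]
              apply ih
              · exact h1
              · rw [hbuild, ← h2]; simp [pvBuildStep, hco]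
              · rw [h3, PySem.Dict.contains_insert]; simp
            · have hA : pvStepA date (arts, d) e = (arts, d) := by
                simp [pvStepA, hty, hau, hlo, hco]
              rw [hA, hB]
              apply ih
              · exact h1
              · rw [hbuild, ← h2]; simp [pvBuildStep, hty, hau, hlo, hco]
              · exact h3

-- ===== VERDICT (by name: the statement is the Claim_ definition above) =====
theorem get_formed_articles_spec : Claim_equal_get_formed_articles := by
  intro all_text date _ _
  unfold Spec_get_formed_articles get_formed_articles get_formed_articles_alt
  exact pv_inv date all_text [] [] false [] (PySem.Dict.mk [("date", date)]) rfl rfl (by rfl)
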